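-- pv_equiv track=rewrite | github.com/NicholasCanova/cbb-video-annotator | Evaluation/annotation_eval.py | compute_subtype_confusion
-- ===== SOURCE A (Python) =====
-- from collections import defaultdict
--
-- def compute_subtype_confusion(tp_pairs):
--     """
--     For each label, build a confusion matrix over subType predictions.
--
--     Only includes labels where at least one TP pair has a non-"None" subType
--     in either ground truth or prediction.
--
--     Returns
--     -------
--     { label: { gt_subType: { pred_subType: count } } }
--     """
--     raw = defaultdict(lambda: defaultdict(lambda: defaultdict(int)))
--     has_meaningful = defaultdict(bool)
--
--     for gt_ann, pred_ann in tp_pairs: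
--         label = gt_ann["label"]
--         gt_sub = gt_ann["subType"]
--         pred_sub = pred_ann["subType"]
--         raw[label][gt_sub][pred_sub] += 1
--         if gt_sub != "None" or pred_sub != "None":
--             has_meaningful[label] = True
--
--     return {label: raw[label] for label in raw if has_meaningful[label]}
-- ===== SOURCE B (Python) =====
-- def _dedup(xs):
--     seen = []
--     for x in xs:
--         if x not in seen:
--             seen.append(x)
--     return seen
--
--
-- def compute_subtype_confusion(tp_pairs):
--     """
--     Group-then-count: flatten to (label, gt_sub, pred_sub) triples, then for
--     each distinct label (first-seen order) that has any non-"None" subType,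
--     build its matrix by filtering its triples and counting occurrences.
--     """
--     triples = [(g["label"], g["subType"], p["subType"]) for g, p in tp_pairs]
--     result = {}
--     for label in _dedup(t[0] for t in triples):
--         mine = [(gt, pd) for l, gt, pd in triples if l == label]
--         if any(gt != "None" or pd != "None" for gt, pd in mine):
--             mat = {}
--             for gt in _dedup(gt for gt, _ in mine):
--                 preds = [pd for g, pd in mine if g == gt]
--                 mat[gt] = {pd: preds.count(pd) for pd in _dedup(preds)}
--             result[label] = mat
--     return result
-- ===== Notes on version B (the rewrite author's own statement) =====
-- stated objective: alternative
-- what changed: B replaces A's single incremental pass (triple-nested defaultdict plus a has_meaningful flag dict updated per pair) with staged group-then-count passes: flatten to (label, gt, pred) triples, dedup labels in first-seen order, and for each label with any non-'None' subType build its matrix by filtering its triples and counting occurrences with list.count; no nested counting dict or flag is maintained during a pass.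
import Mathlib
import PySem

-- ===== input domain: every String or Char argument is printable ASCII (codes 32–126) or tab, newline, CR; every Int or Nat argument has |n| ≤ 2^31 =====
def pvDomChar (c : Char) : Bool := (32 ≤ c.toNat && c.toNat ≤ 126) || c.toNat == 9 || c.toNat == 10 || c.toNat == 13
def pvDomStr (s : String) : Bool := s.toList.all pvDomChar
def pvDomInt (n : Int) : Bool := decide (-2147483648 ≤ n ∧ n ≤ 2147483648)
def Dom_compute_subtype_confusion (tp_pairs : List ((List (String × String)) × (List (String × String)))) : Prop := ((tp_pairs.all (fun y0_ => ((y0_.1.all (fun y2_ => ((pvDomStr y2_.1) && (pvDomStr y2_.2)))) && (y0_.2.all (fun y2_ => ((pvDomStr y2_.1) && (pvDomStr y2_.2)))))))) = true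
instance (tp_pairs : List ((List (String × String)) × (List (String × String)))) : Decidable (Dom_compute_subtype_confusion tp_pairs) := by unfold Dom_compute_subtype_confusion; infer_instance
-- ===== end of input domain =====

-- B replaces A's single incremental pass (nested defaultdicts + a flag dict) with staged
-- group-then-count passes: dedup labels, then filter + count per label (objective: alternative).

-- shared field extraction (gt_ann["label"], gt_ann["subType"], pred_ann["subType"]; key present by Pre_, none = KeyError)
def pvLab (pr : (List (String × String)) × (List (String × String))) : String := ((PySem.Dict.mk pr.1).get? "label").getD ""
def pvGt (pr : (List (String × String)) × (List (String × String))) : String := ((PySem.Dict.mk pr.1).get? "subType").getD ""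
def pvPd (pr : (List (String × String)) × (List (String × String))) : String := ((PySem.Dict.mk pr.2).get? "subType").getD ""

-- ===== PORT A =====
def compute_subtype_confusion (tp_pairs : List ((List (String × String)) × (List (String × String)))) : List (String × List (String × List (String × Int))) :=
  -- raw = defaultdict(…); has_meaningful = defaultdict(bool); one loop filling both
  let st := tp_pairs.foldl
    (fun (st : PySem.Dict String (PySem.Dict String (PySem.Dict String Int)) × PySem.Dict String Bool) pr =>
      let label := pvLab pr
      let gt_sub := pvGt pr
      let pred_sub := pvPd pr
      (st.1.modify label PySem.Dict.empty
         (fun m => m.modify gt_sub PySem.Dict.empty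
           (fun r => r.modify pred_sub 0 (· + 1))),                   -- raw[label][gt_sub][pred_sub] += 1
       if gt_sub != "None" || pred_sub != "None" then st.2.insert label true else st.2))
    (PySem.Dict.empty, PySem.Dict.empty)
  -- {label: raw[label] for label in raw if has_meaningful[label]}
  st.1.keys.foldl
    (fun acc label =>
      if st.2.getD label false then
        acc ++ [(label, (st.1.getD label PySem.Dict.empty).items.map (fun g => (g.1, g.2.items)))]
      else acc) []

-- ===== PORT B =====
-- _dedup: first occurrences in order ('if x not in seen: seen.append(x)')
def pvDedup (xs : List String) : List String :=
  xs.foldl (fun seen x => if seen.contains x then seen else seen ++ [x]) []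

def compute_subtype_confusion_alt (tp_pairs : List ((List (String × String)) × (List (String × String)))) : List (String × List (String × List (String × Int))) :=
  -- triples = [(g["label"], g["subType"], p["subType"]) for g, p in tp_pairs]
  let triples := tp_pairs.map (fun pr => (pvLab pr, pvGt pr, pvPd pr))
  -- for label in _dedup(labels): group, test meaningfulness, count
  (pvDedup (triples.map (·.1))).foldl
    (fun result label =>
      let mine := (triples.filter (fun t => t.1 == label)).map (fun t => (t.2.1, t.2.2))
      if mine.any (fun gp => gp.1 != "None" || gp.2 != "None") then
        result ++ [(label,
          (pvDedup (mine.map (·.1))).map (fun gt =>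
            let preds := (mine.filter (fun gp => gp.1 == gt)).map (·.2)
            (gt, (pvDedup preds).map (fun pd => (pd, (preds.count pd : Int))))))]
      else result)
    []

-- ===== PRECONDITION & SPEC =====
-- Pre_ excludes exactly the inputs on which Python A raises KeyError: some annotation dict
-- lacking the "label" key (ground truth) or the "subType" key (either side); B raises there too.
def Pre_compute_subtype_confusion (tp_pairs : List ((List (String × String)) × (List (String × String)))) : Prop :=
  (tp_pairs.all (fun pr =>
    (PySem.Dict.mk pr.1).contains "label" &&
    (PySem.Dict.mk pr.1).contains "subType" &&
    (PySem.Dict.mk pr.2).contains "subType")) = true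
instance (tp_pairs : List ((List (String × String)) × (List (String × String)))) : Decidable (Pre_compute_subtype_confusion tp_pairs) := by unfold Pre_compute_subtype_confusion; infer_instance

def pvWitness_compute_subtype_confusion : (List ((List (String × String)) × (List (String × String)))) :=
  [([("label", "shot"), ("subType", "3pt")], [("subType", "None")]),
   ([("label", "pass"), ("subType", "None")], [("subType", "None")])]

def Spec_compute_subtype_confusion (tp_pairs : List ((List (String × String)) × (List (String × String)))) (out : List (String × List (String × List (String × Int)))) : Prop := out = compute_subtype_confusion_alt tp_pairs
instance (tp_pairs : List ((List (String × String)) × (List (String × String)))) (out : List (String × List (String × List (String × Int)))) : Decidable (Spec_compute_subtype_confusion tp_pairs out) := by unfold Spec_compute_subtype_confusion; infer_instance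

-- ===== CLAIM (what is proved, stated in full; the proofs are below) =====
def Claim_equal_compute_subtype_confusion : Prop := ∀ (tp_pairs : List ((List (String × String)) × (List (String × String)))), Dom_compute_subtype_confusion tp_pairs → Pre_compute_subtype_confusion tp_pairs → Spec_compute_subtype_confusion tp_pairs (compute_subtype_confusion tp_pairs)

-- ===== LEMMAS AND PROOFS =====

-- the two loop bodies of A, over extracted triples (label, gt, pred)
def pvStep1 (raw : PySem.Dict String (PySem.Dict String (PySem.Dict String Int)))
    (t : String × String × String) : PySem.Dict String (PySem.Dict String (PySem.Dict String Int)) :=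
  raw.modify t.1 PySem.Dict.empty
    (fun m => m.modify t.2.1 PySem.Dict.empty (fun r => r.modify t.2.2 0 (· + 1)))

def pvStep2 (m : PySem.Dict String (PySem.Dict String Int))
    (t : String × String × String) : PySem.Dict String (PySem.Dict String Int) :=
  m.modify t.2.1 PySem.Dict.empty (fun r => r.modify t.2.2 0 (· + 1))

def pvMeanStep (mean : PySem.Dict String Bool) (t : String × String × String) : PySem.Dict String Bool :=
  if t.2.1 != "None" || t.2.2 != "None" then mean.insert t.1 true else mean

-- pvDedup is set() first-occurrence dedup
theorem pvDedup_eq (xs : List String) : pvDedup xs = PySem.Set.ofList xs := by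
  rfl

-- localization: the label-l slot of the top-level fold is the fold over l's triples
theorem pv_loc1 (ts : List (String × String × String)) :
    ∀ (d : PySem.Dict String (PySem.Dict String (PySem.Dict String Int))) (l : String),
    (ts.foldl pvStep1 d).getD l PySem.Dict.empty =
      (ts.filter (fun t => t.1 == l)).foldl pvStep2 (d.getD l PySem.Dict.empty) := by
  induction ts with
  | nil => intro d l; rfl
  | cons t rest ih =>
    intro d l
    simp only [List.foldl_cons, List.filter_cons]
    by_cases h : t.1 = l
    · rw [if_pos (by simp [h]), List.foldl_cons, ih]
      congr 1
      unfold pvStep1 pvStep2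
      rw [PySem.Dict.getD_modify, if_pos h.symm, h]
    · rw [if_neg (by simp [h]), ih]
      congr 1
      unfold pvStep1
      rw [PySem.Dict.getD_modify, if_neg (fun he => h he.symm)]

-- localization one level down: the gt-g slot is the count fold over g's predictions
theorem pv_loc2 (ms : List (String × String × String)) :
    ∀ (d : PySem.Dict String (PySem.Dict String Int)) (g : String),
    (ms.foldl pvStep2 d).getD g PySem.Dict.empty =
      (((ms.filter (fun t => t.2.1 == g)).map (fun t => t.2.2)).foldl
        (fun r x => r.modify x 0 (· + 1)) (d.getD g PySem.Dict.empty)) := by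
  induction ms with
  | nil => intro d g; rfl
  | cons t rest ih =>
    intro d g
    simp only [List.foldl_cons, List.filter_cons]
    by_cases h : t.2.1 = g
    · rw [if_pos (by simp [h]), List.map_cons, List.foldl_cons, ih]
      congr 1
      unfold pvStep2
      rw [PySem.Dict.getD_modify, if_pos h.symm, h]
    · rw [if_neg (by simp [h]), ih]
      congr 1
      unfold pvStep2
      rw [PySem.Dict.getD_modify, if_neg (fun he => h he.symm)]

-- A's has_meaningful flag is 'some triple of this label is meaningful'
theorem pv_mean (ts : List (String × String × String)) :
    ∀ (d : PySem.Dict String Bool) (l : String),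
    (ts.foldl pvMeanStep d).getD l false =
      (d.getD l false || (ts.filter (fun t => t.1 == l)).any (fun t => t.2.1 != "None" || t.2.2 != "None")) := by
  induction ts with
  | nil => intro d l; simp
  | cons t rest ih =>
    intro d l
    simp only [List.foldl_cons, List.filter_cons]
    have hstep : pvMeanStep d t = if (t.2.1 != "None" || t.2.2 != "None") then d.insert t.1 true else d := rfl
    rw [hstep]
    by_cases hc : (t.2.1 != "None" || t.2.2 != "None")
    · rw [if_pos hc]
      by_cases h : t.1 = l
      · rw [if_pos (by simp [h]), List.any_cons, ih, PySem.Dict.getD_insert, if_pos h.symm, hc]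
        simp
      · rw [if_neg (by simp [h]), ih, PySem.Dict.getD_insert, if_neg (fun he => h he.symm)]
    · rw [if_neg hc]
      by_cases h : t.1 = l
      · rw [if_pos (by simp [h]), List.any_cons, ih,
          (by simpa using hc : (t.2.1 != "None" || t.2.2 != "None") = false)]
        simp
      · rw [if_neg (by simp [h]), ih]

theorem pv_main (tp : List ((List (String × String)) × (List (String × String)))) :
    compute_subtype_confusion tp = compute_subtype_confusion_alt tp := by
  -- name the triple list and the two final dicts
  set ts : List (String × String × String) := tp.map (fun pr => (pvLab pr, pvGt pr, pvPd pr)) with hts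
  have hsplit : (tp.foldl
    (fun (st : PySem.Dict String (PySem.Dict String (PySem.Dict String Int)) × PySem.Dict String Bool) pr =>
      let label := pvLab pr
      let gt_sub := pvGt pr
      let pred_sub := pvPd pr
      (st.1.modify label PySem.Dict.empty
         (fun m => m.modify gt_sub PySem.Dict.empty
           (fun r => r.modify pred_sub 0 (· + 1))),
       if gt_sub != "None" || pred_sub != "None" then st.2.insert label true else st.2))
    (PySem.Dict.empty, PySem.Dict.empty))
      = (ts.foldl pvStep1 PySem.Dict.empty, ts.foldl pvMeanStep PySem.Dict.empty) := by
    rw [hts, List.foldl_map, List.foldl_map]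
    exact PySem.List.foldl_prod_mk
      (fun raw pr => pvStep1 raw (pvLab pr, pvGt pr, pvPd pr))
      (fun mean pr => pvMeanStep mean (pvLab pr, pvGt pr, pvPd pr)) tp _ _
  set raw := ts.foldl pvStep1 PySem.Dict.empty with hraw
  set mean := ts.foldl pvMeanStep PySem.Dict.empty with hmean
  have hkeys : raw.keys = PySem.Set.ofList (ts.map (·.1)) := by
    rw [hraw]
    unfold pvStep1
    rw [PySem.Dict.keys_foldl_modify_key ts (fun t => t.1) PySem.Dict.empty
      (fun raw t => fun m => m.modify t.2.1 PySem.Dict.empty (fun r => r.modify t.2.2 0 (· + 1)))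
      PySem.Dict.empty]
    rfl
  -- A's output as filter+map over raw.keys
  unfold compute_subtype_confusion
  rw [hsplit]
  rw [PySem.List.foldl_append_if (fun label => mean.getD label false)
    (fun label => (label, (raw.getD label PySem.Dict.empty).items.map (fun g => (g.1, g.2.items))))]
  rw [List.nil_append]
  -- B's output as filter+map over the deduped labels
  unfold compute_subtype_confusion_alt
  rw [← hts]
  rw [PySem.List.foldl_append_if
    (fun label => ((ts.filter (fun t => t.1 == label)).map (fun t => (t.2.1, t.2.2))).any
      (fun gp => gp.1 != "None" || gp.2 != "None"))
    (fun label =>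
      (label,
        (pvDedup (((ts.filter (fun t => t.1 == label)).map (fun t => (t.2.1, t.2.2))).map (·.1))).map (fun gt =>
          (gt, (pvDedup ((((ts.filter (fun t => t.1 == label)).map (fun t => (t.2.1, t.2.2))).filter
              (fun gp => gp.1 == gt)).map (·.2))).map (fun pd =>
            (pd, (((((ts.filter (fun t => t.1 == label)).map (fun t => (t.2.1, t.2.2))).filter
              (fun gp => gp.1 == gt)).map (·.2)).count pd : Int)))))))]
  rw [List.nil_append, pvDedup_eq, ← hkeys]
  -- same key list; show the filters and the mapped bodies agree pointwise
  have hfilter : raw.keys.filter (fun label => mean.getD label false)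
      = raw.keys.filter (fun label => ((ts.filter (fun t => t.1 == label)).map (fun t => (t.2.1, t.2.2))).any
          (fun gp => gp.1 != "None" || gp.2 != "None")) := by
    apply List.filter_congr
    intro l _
    rw [hmean, pv_mean, PySem.Dict.getD_empty, Bool.false_or, List.any_map]
    rfl
  rw [← hfilter]
  apply List.map_congr_left
  intro l _
  -- per-label matrix: A's nested dict items = B's grouped/counted lists
  have hmat : raw.getD l PySem.Dict.empty
      = (ts.filter (fun t => t.1 == l)).foldl pvStep2 PySem.Dict.empty := by
    rw [hraw, pv_loc1, PySem.Dict.getD_empty]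
  set msf := ts.filter (fun t => t.1 == l) with hmsf
  have hmkeys : (raw.getD l PySem.Dict.empty).keys = PySem.Set.ofList (msf.map (·.2.1)) := by
    rw [hmat]
    unfold pvStep2
    rw [PySem.Dict.keys_foldl_modify_key msf (fun t => t.2.1) PySem.Dict.empty
      (fun m t => fun r => r.modify t.2.2 0 (· + 1)) PySem.Dict.empty]
    rfl
  have hmnodup : (raw.getD l PySem.Dict.empty).keys.Nodup := by
    rw [hmkeys]; exact PySem.Set.nodup_ofList _
  rw [PySem.Dict.items_eq_map_keys _ hmnodup PySem.Dict.empty, hmkeys]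
  simp only [List.map_map, Function.comp_def]
  -- B side: mine.map (·.1) = msf.map (·.2.1); mine.filter/map chains collapse
  rw [pvDedup_eq]
  congr 1
  apply List.map_congr_left
  intro g _
  have hrow : (raw.getD l PySem.Dict.empty).getD g PySem.Dict.empty
      = PySem.Dict.counter ((msf.filter (fun t => t.2.1 == g)).map (fun t => t.2.2)) := by
    rw [hmat, pv_loc2, PySem.Dict.getD_empty, PySem.Dict.counter_eq_foldl]
  have hps : (((msf.map (fun t => (t.2.1, t.2.2))).filter (fun gp => gp.1 == g)).map (·.2))
      = (msf.filter (fun t => t.2.1 == g)).map (fun t => t.2.2) := by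
    rw [List.filter_map, List.map_map]
    rfl
  rw [hrow, PySem.Dict.items_counter, hps, pvDedup_eq]

-- ===== VERDICT (by name: the statement is the Claim_ definition above) =====
theorem compute_subtype_confusion_spec : Claim_equal_compute_subtype_confusion := by
  intro tp _ _
  unfold Spec_compute_subtype_confusion
  exact pv_main tp
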